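-- pv_equiv track=rewrite | github.com/Sin-Yejun/Coding-Study | 백준/[6571번] 피보나치 수의 개수.py | dp
-- ===== SOURCE A (Python) =====
-- def dp(a, b):
--     dp = [1,1]
--     cnt = 0
--     for i in range(2,b+1):
--         if dp[i-1]+dp[i-2] > b:
--             break
--         dp.append(dp[i-1]+dp[i-2])
--     dp = dp[1:]
--     for i in dp:
--         if a <= i <= b:
--             cnt += 1
--     return cnt
-- ===== SOURCE B (Python) =====
-- def dp(a, b):
--     cnt = 1 if a <= 1 <= b else 0
--     p, c = 1, 2
--     while c <= b:
--         if a <= c: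
--             cnt += 1
--         p, c = c, p + c
--     return cnt
-- ===== Notes on version B (the rewrite author's own statement) =====
-- stated objective: simpler
-- what changed: Replaces A's materialised Fibonacci list, indexed lookups and second counting pass by a single streaming loop over two scalar variables that counts in the same pass.
import Mathlib
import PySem

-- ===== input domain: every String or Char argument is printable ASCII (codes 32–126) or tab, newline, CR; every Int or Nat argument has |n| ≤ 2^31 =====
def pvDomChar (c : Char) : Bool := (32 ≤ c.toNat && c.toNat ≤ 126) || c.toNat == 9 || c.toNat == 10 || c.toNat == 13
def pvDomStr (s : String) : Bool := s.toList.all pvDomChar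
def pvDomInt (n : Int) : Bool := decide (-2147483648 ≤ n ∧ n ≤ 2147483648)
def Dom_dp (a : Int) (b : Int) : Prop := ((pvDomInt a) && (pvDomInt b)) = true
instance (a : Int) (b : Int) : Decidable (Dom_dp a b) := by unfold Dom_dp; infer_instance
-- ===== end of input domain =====

-- B replaces A's materialised Fibonacci list and second counting pass by one streaming
-- loop over two scalar variables (objective: simpler); same return value on all inputs.

-- ===== PORT A =====
-- 'for i in range(2, b+1): …' with break, ported as a lazy counter loop over i
def buildA (b : Int) (i : Int) (l : List Int) : List Int :=
  if _h : i < b + 1 then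
    let v := (PySem.List.pyGet? l (i - 1)).getD 0 + (PySem.List.pyGet? l (i - 2)).getD 0
    if v > b then l else buildA b (i + 1) (l ++ [v])
  else l
termination_by (b + 1 - i).toNat
decreasing_by omega

def dp (a : Int) (b : Int) : Int :=
  let l := buildA b 2 [1, 1]
  let l2 := PySem.List.slice l (some 1) none
  l2.foldl (fun cnt i => if a ≤ i ∧ i ≤ b then cnt + 1 else cnt) 0

-- ===== PORT B =====
-- 'while c <= b: …' ported as well-founded recursion on b - c (p, c stay ≥ 1)
def bLoop (a b p c cnt : Int) (hp : 1 ≤ p) (hc : 1 ≤ c) : Int :=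
  if _h : c ≤ b then
    bLoop a b c (p + c) (if a ≤ c then cnt + 1 else cnt) hc (by omega)
  else cnt
termination_by (b + 1 - c).toNat
decreasing_by omega

def dp_alt (a : Int) (b : Int) : Int :=
  bLoop a b 1 2 (if a ≤ 1 ∧ 1 ≤ b then 1 else 0) (by decide) (by decide)

-- ===== PRECONDITION & SPEC =====
def Spec_dp (a : Int) (b : Int) (out : Int) : Prop := out = dp_alt a b
instance (a : Int) (b : Int) (out : Int) : Decidable (Spec_dp a b out) := by unfold Spec_dp; infer_instance

-- ===== CLAIM (what is proved, stated in full; the proofs are below) =====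
def Claim_equal_dp : Prop := ∀ (a : Int) (b : Int), Dom_dp a b → Spec_dp a b (dp a b)

-- ===== LEMMAS AND PROOFS =====

-- the Fibonacci values counted by either program: c, p+c, … while ≤ b (fuel-indexed)
def fibsF (b : Int) : Nat → Int → Int → List Int
  | 0, _, _ => []
  | n + 1, p, c => if c ≤ b then c :: fibsF b n c (p + c) else []

def cntList (a b : Int) : List Int → Int
  | [] => 0
  | x :: xs => (if a ≤ x ∧ x ≤ b then 1 else 0) + cntList a b xs

theorem foldl_cnt (a b : Int) (l : List Int) : ∀ (init : Int),
    List.foldl (fun cnt i => if a ≤ i ∧ i ≤ b then cnt + 1 else cnt) init l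
      = init + cntList a b l := by
  induction l with
  | nil => intro init; simp [cntList]
  | cons x xs ih =>
      intro init
      simp only [List.foldl_cons, cntList]
      rw [ih]
      split_ifs <;> ring

theorem bLoop_eq (a b : Int) : ∀ (n : Nat) (p c cnt : Int) (hp : 1 ≤ p) (hc : 1 ≤ c),
    (b + 1 - c).toNat ≤ n →
    bLoop a b p c cnt hp hc = cnt + cntList a b (fibsF b n p c) := by
  intro n
  induction n with
  | zero =>
      intro p c cnt hp hc hn
      have h : ¬ c ≤ b := by omega
      rw [bLoop]
      simp [h, fibsF, cntList]
  | succ n ih =>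
      intro p c cnt hp hc hn
      rw [bLoop]
      by_cases h : c ≤ b
      · simp only [h, dif_pos]
        rw [ih c (p + c) _ hc (by omega) (by omega)]
        simp only [fibsF, h, if_pos, cntList]
        simp only [and_true]
        split_ifs <;> ring
      · simp [h, fibsF, cntList]

theorem buildA_eq (b : Int) : ∀ (n : Nat) (M : List Int) (p c : Int),
    1 ≤ p → p ≤ c → (M.length : Int) + 1 ≤ c →
    (b + 1 - ((M.length : Int) + 2)).toNat ≤ n →
    buildA b ((M.length : Int) + 2) (M ++ [p, c]) =
      (M ++ [p, c]) ++ fibsF b n c (p + c) := by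
  intro n
  induction n with
  | zero =>
      intro M p c hp hpc hlen hn
      have hi : ¬ ((M.length : Int) + 2 < b + 1) := by omega
      rw [buildA]
      simp [hi, fibsF]
  | succ n ih =>
      intro M p c hp hpc hlen hn
      rw [buildA]
      by_cases hi : (M.length : Int) + 2 < b + 1
      · simp only [hi, dif_pos]
        have e1 : ((M.length : Int) + 2 - 1) = ((M.length : Int) + 1) := by ring
        have e2 : ((M.length : Int) + 2 - 2) = ((M.length : Int) : Int) := by ring
        have g1 : (PySem.List.pyGet? (M ++ [p, c]) ((M.length : Int) + 1)).getD 0 = c := by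
          rw [show ((M.length : Int) + 1) = ((M.length : Int) + ((1:Nat) : Int)) from by simp]
          rw [PySem.List.pyGet?_append_right]
          simp
        have g2 : (PySem.List.pyGet? (M ++ [p, c]) ((M.length : Int))).getD 0 = p := by
          rw [PySem.List.pyGet?_append_length]
          simp
        rw [e1, e2, g1, g2]
        by_cases hv : c + p > b
        · have hg : ¬ (p + c ≤ b) := by omega
          simp [hv, fibsF, hg]
        · simp only [hv]
          have hg : p + c ≤ b := by omega
          have hcp : c + p = p + c := by ring
          rw [hcp]
          have hl : (M ++ [p, c]) ++ [p + c] = (M ++ [p]) ++ [c, p + c] := by simp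
          have hidx : (M.length : Int) + 2 + 1 = (((M ++ [p]).length : Int) + 2) := by
            simp; ring
          rw [hl, hidx]
          rw [ih (M ++ [p]) c (p + c) (by omega) (by omega) (by simp; omega) (by simp; omega)]
          simp only [fibsF, hg, if_pos]
          simp
      · have hg : ¬ (p + c ≤ b) := by omega
        rw [fibsF]
        simp [hi, hg]

theorem dp_eq_count (a b : Int) :
    dp a b = (if a ≤ 1 ∧ 1 ≤ b then (1:Int) else 0) +
      cntList a b (fibsF b (b - 1).toNat 1 2) := by
  have hb : buildA b 2 [1, 1] = [1, 1] ++ fibsF b (b - 1).toNat 1 2 := by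
    have h := buildA_eq b ((b - 1).toNat) [] 1 1 (by decide) (by decide)
      (by simp only [List.length_nil, Nat.cast_zero]; omega)
      (by simp only [List.length_nil, Nat.cast_zero]; omega)
    simpa using h
  show List.foldl (fun cnt i => if a ≤ i ∧ i ≤ b then cnt + 1 else cnt) 0
      (PySem.List.slice (buildA b 2 [1, 1]) (some 1) none) = _
  rw [hb, PySem.List.slice_from ([1, 1] ++ fibsF b (b - 1).toNat 1 2) (a := 1) (by decide)]
  simp only [Int.toNat_one, List.cons_append, List.nil_append, List.drop_succ_cons,
    List.drop_zero]
  rw [foldl_cnt]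
  simp only [cntList, zero_add]

-- ===== VERDICT (by name: the statement is the Claim_ definition above) =====
theorem dp_spec : Claim_equal_dp := by
  intro a b _
  unfold Spec_dp dp_alt
  rw [bLoop_eq a b ((b - 1).toNat) 1 2 _ (by decide) (by decide) (by omega)]
  rw [dp_eq_count]
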